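-- pv_equiv track=rewrite | github.com/DigiFors/ChangeDetection | src/ChangeDetection/relationship_detection.py | simplify_changes
-- ===== SOURCE A (Python) =====
-- def simplify_changes(changes):
--     res = [changes[0]]
--     for i in range(1, len(changes)):
--         change = changes[i]
--         key = change[0]
--         value = change[1:]
--         if key == res[-1][0]:
--             res[-1] = res[-1] + value
--         else:
--             res.append(change)
--     return res
-- ===== SOURCE B (Python) =====
-- def simplify_changes(changes):
--     # Two-phase: group consecutive changes with equal key into runs,
--     # then merge each run (first tuple + all later tails).
--     runs = []
--     for change in changes:
--         if runs and change[0] == runs[-1][0][0]: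
--             runs[-1].append(change)
--         else:
--             runs.append([change])
--     res = []
--     for run in runs:
--         merged = run[0]
--         for c in run[1:]:
--             merged = merged + c[1:]
--         res.append(merged)
--     return res
-- ===== Notes on version B (the rewrite author's own statement) =====
-- stated objective: alternative
-- what changed: Replaces A's index loop that merges into res[-1] by a two-phase pass: first group consecutive equal-key changes into runs, then a separate merging pass concatenates each run's tails onto its first tuple.
import Mathlib
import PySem

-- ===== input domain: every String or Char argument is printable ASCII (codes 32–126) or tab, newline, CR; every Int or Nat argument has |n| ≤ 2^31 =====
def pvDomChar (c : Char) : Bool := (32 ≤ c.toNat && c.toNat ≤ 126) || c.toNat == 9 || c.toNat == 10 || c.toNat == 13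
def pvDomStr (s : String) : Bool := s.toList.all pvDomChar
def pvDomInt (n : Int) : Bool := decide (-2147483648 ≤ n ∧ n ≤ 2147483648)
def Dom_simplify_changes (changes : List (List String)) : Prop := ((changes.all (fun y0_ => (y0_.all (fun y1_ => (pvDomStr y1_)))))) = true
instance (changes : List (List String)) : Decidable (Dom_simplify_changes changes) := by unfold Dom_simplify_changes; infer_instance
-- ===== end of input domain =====

-- B merges consecutive equal-key changes by grouping into runs first, then merging each run once
-- (vs A's rebuild-the-last-tuple index loop); equivalence is about the return value only.

-- ===== PORT A =====
-- res[-1] = res[-1] + value  is modelled as  res.dropLast ++ [last ++ value]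
def simplify_changes (changes : List (List String)) : List (List String) :=
  let res0 := [PySem.List.pyGetD changes 0 []]
  (PySem.List.pyRange 1 (changes.length : Int) 1).foldl (fun res i =>
    let change := PySem.List.pyGetD changes i []
    let key := PySem.List.pyGetD change 0 ""
    let value := PySem.List.slice change (some 1) none
    let last := PySem.List.pyGetD res (-1) []
    if key == PySem.List.pyGetD last 0 "" then
      res.dropLast ++ [last ++ value]
    else res ++ [change]) res0

-- ===== PORT B =====
-- runs[-1].append(change)  is modelled as  runs.dropLast ++ [last ++ [change]]
def simplify_changes_alt (changes : List (List String)) : List (List String) :=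
  let runs : List (List (List String)) := changes.foldl (fun runs change =>
    if !runs.isEmpty &&
        (PySem.List.pyGetD change 0 "" ==
         PySem.List.pyGetD (PySem.List.pyGetD (PySem.List.pyGetD runs (-1) []) 0 []) 0 "") then
      runs.dropLast ++ [PySem.List.pyGetD runs (-1) [] ++ [change]]
    else runs ++ [[change]]) []
  runs.map (fun run =>
    (PySem.List.slice run (some 1) none).foldl
      (fun merged c => merged ++ PySem.List.slice c (some 1) none)
      (PySem.List.pyGetD run 0 []))

-- ===== PRECONDITION & SPEC =====
-- Pre_ is exactly A's return domain: A raises IndexError on the empty list (changes[0]) and,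
-- once the loop runs (two or more changes), on any empty inner change (change[0] / res[-1][0]);
-- a singleton never reaches the loop, so it is admitted whatever its inner change.
def Pre_simplify_changes (changes : List (List String)) : Prop :=
  changes ≠ [] ∧ (changes.length = 1 ∨ ∀ c ∈ changes, c ≠ [])
instance (changes : List (List String)) : Decidable (Pre_simplify_changes changes) := by
  unfold Pre_simplify_changes; infer_instance
def pvWitness_simplify_changes : List (List String) := [["a", "1"], ["a", "2"], ["b", "3"]]

def Spec_simplify_changes (changes : List (List String)) (out : List (List String)) : Prop := out = simplify_changes_alt changes
instance (changes : List (List String)) (out : List (List String)) : Decidable (Spec_simplify_changes changes out) := by unfold Spec_simplify_changes; infer_instance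

-- ===== CLAIM (what is proved, stated in full; the proofs are below) =====
def Claim_equal_simplify_changes : Prop := ∀ (changes : List (List String)), Dom_simplify_changes changes → Pre_simplify_changes changes → Spec_simplify_changes changes (simplify_changes changes)

-- ===== LEMMAS AND PROOFS =====

-- Common reference recursion: merge consecutive changes into the accumulator cur.
def pvRef (cur : List String) : List (List String) → List (List String)
  | [] => [cur]
  | c :: rest =>
      if PySem.List.pyGetD c 0 "" == PySem.List.pyGetD cur 0 "" then
        pvRef (cur ++ c.tail) rest
      else cur :: pvRef c rest

-- A's loop body, after the index loop is turned into a fold over the elements.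
lemma pvA_loop (l : List (List String)) :
    ∀ (done : List (List String)) (cur : List String),
    l.foldl (fun res change =>
      if PySem.List.pyGetD change 0 "" == PySem.List.pyGetD (PySem.List.pyGetD res (-1) []) 0 "" then
        res.dropLast ++ [PySem.List.pyGetD res (-1) [] ++ change.tail]
      else res ++ [change]) (done ++ [cur]) = done ++ pvRef cur l := by
  induction l with
  | nil => intro done cur; simp [pvRef]
  | cons c rest ih =>
    intro done cur
    rw [List.foldl_cons]
    simp only [PySem.List.pyGetD_neg_one_append_singleton, List.dropLast_concat, pvRef]
    by_cases h : (PySem.List.pyGetD c 0 "" == PySem.List.pyGetD cur 0 "") = true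
    · rw [if_pos h, if_pos h, ih done (cur ++ c.tail)]
    · rw [if_neg h, if_neg h, List.append_assoc done [cur] [c],
        show ([cur] ++ [c] : List (List String)) = [cur] ++ [c] from rfl]
      rw [← List.append_assoc done [cur] [c], ih (done ++ [cur]) c]
      simp

def pvMerge (run : List (List String)) : List String :=
  PySem.List.pyGetD run 0 [] ++ run.tail.flatMap (fun c => c.tail)

-- B's inner merging loop is this fold; it equals pvMerge.
lemma pvFold_merge (gs : List (List String)) :
    ∀ init : List String,
    gs.foldl (fun merged c => merged ++ c.tail) init = init ++ gs.flatMap (fun c => c.tail) := by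
  induction gs with
  | nil => intro init; simp
  | cons c rest ih => intro init; simp [ih]

lemma pvMerge_head (g : List String) (gs : List (List String)) (hg : g ≠ []) :
    PySem.List.pyGetD (pvMerge (g :: gs)) 0 "" = PySem.List.pyGetD g 0 "" := by
  cases g with
  | nil => exact absurd rfl hg
  | cons x xs => simp [pvMerge, PySem.List.pyGetD_zero_cons]

lemma pvB_loop (l : List (List String)) :
    ∀ (done : List (List (List String))) (g : List String) (gs : List (List String)),
    g ≠ [] → (∀ c ∈ l, c ≠ []) →
    (l.foldl (fun runs change =>
      if !runs.isEmpty &&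
          (PySem.List.pyGetD change 0 "" ==
           PySem.List.pyGetD (PySem.List.pyGetD (PySem.List.pyGetD runs (-1) []) 0 []) 0 "") then
        runs.dropLast ++ [PySem.List.pyGetD runs (-1) [] ++ [change]]
      else runs ++ [[change]]) (done ++ [g :: gs])).map pvMerge
      = done.map pvMerge ++ pvRef (pvMerge (g :: gs)) l := by
  induction l with
  | nil => intro done g gs _ _; simp [pvRef]
  | cons c rest ih =>
    intro done g gs hg hl
    have hc : c ≠ [] := hl c (List.mem_cons_self ..)
    have hrest : ∀ x ∈ rest, x ≠ [] := fun x hx => hl x (List.mem_cons_of_mem _ hx)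
    rw [List.foldl_cons]
    have hie : (done ++ [g :: gs]).isEmpty = false := by simp
    simp only [PySem.List.pyGetD_neg_one_append_singleton, List.dropLast_concat,
      PySem.List.pyGetD_zero_cons, hie, Bool.not_false, Bool.true_and]
    rw [pvRef.eq_2, pvMerge_head g gs hg]
    by_cases h : (PySem.List.pyGetD c 0 "" == PySem.List.pyGetD g 0 "") = true
    · rw [if_pos h, if_pos h,
        show ((g :: gs) ++ [c] : List (List String)) = g :: (gs ++ [c]) from rfl,
        ih done g (gs ++ [c]) hg hrest]
      have hm : pvMerge (g :: (gs ++ [c])) = pvMerge (g :: gs) ++ c.tail := by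
        simp [pvMerge]
      rw [hm]
    · rw [if_neg h, if_neg h,
        show ((done ++ [g :: gs]) ++ [[c]] : List (List (List String)))
          = (done ++ [g :: gs]) ++ [c :: []] from rfl,
        ih (done ++ [g :: gs]) c [] hc hrest]
      have hm : pvMerge [c] = c := by simp [pvMerge, PySem.List.pyGetD_zero_cons]
      rw [hm]
      simp

-- ===== VERDICT (by name: the statement is the Claim_ definition above) =====
theorem simplify_changes_spec : Claim_equal_simplify_changes := by
  intro changes _ hpre
  obtain ⟨hne, hone⟩ := hpre
  obtain ⟨c0, rest, rfl⟩ : ∃ c0 rest, changes = c0 :: rest := by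
    cases changes with
    | nil => exact absurd rfl hne
    | cons a b => exact ⟨a, b, rfl⟩
  cases rest with
  | nil =>
    show simplify_changes [c0] = simplify_changes_alt [c0]
    simp [simplify_changes, simplify_changes_alt, PySem.List.pyRange_one_eq_nil,
      PySem.List.pyGetD_zero_cons, PySem.List.slice_from_one]
  | cons c1 rest' =>
  have hall : ∀ c ∈ c0 :: c1 :: rest', c ≠ [] := by
    rcases hone with h1 | h
    · simp at h1
    · exact h
  have hc0 : c0 ≠ [] := hall c0 (List.mem_cons_self ..)
  set rest := c1 :: rest' with hrdef
  have hrest : ∀ x ∈ rest, x ≠ [] := fun x hx => hall x (List.mem_cons_of_mem _ hx)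
  show simplify_changes (c0 :: rest) = simplify_changes_alt (c0 :: rest)
  have hA : simplify_changes (c0 :: rest) = pvRef c0 rest := by
    unfold simplify_changes
    simp only [PySem.List.slice_from_one, PySem.List.pyGetD_zero_cons]
    rw [PySem.List.foldl_pyRange_pyGetD' (c0 :: rest) ([] : List String)
      (fun res change =>
        if PySem.List.pyGetD change 0 "" == PySem.List.pyGetD (PySem.List.pyGetD res (-1) []) 0 "" then
          res.dropLast ++ [PySem.List.pyGetD res (-1) [] ++ change.tail]
        else res ++ [change]) [c0] (by norm_num)]
    simpa using pvA_loop rest [] c0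
  have hB : simplify_changes_alt (c0 :: rest) = pvRef c0 rest := by
    unfold simplify_changes_alt
    simp only [PySem.List.slice_from_one, List.foldl_cons, List.isEmpty_nil,
      Bool.not_true, Bool.false_and, Bool.false_eq_true, if_false, List.nil_append]
    have hmap : (fun run => List.foldl (fun merged c => merged ++ c.tail)
        (PySem.List.pyGetD run 0 []) run.tail) = pvMerge := by
      funext run; rw [pvFold_merge]; rfl
    rw [hmap]
    have := pvB_loop rest ([] : List (List (List String))) c0 [] hc0 hrest
    simpa [pvMerge] using this
  rw [hA, hB]
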